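-- pv_equiv track=rewrite | github.com/Edo09/api-gratex | migrate_data.py | strip_original_data
-- ===== SOURCE A (Python) =====
-- def strip_original_data(sql_content):
--     lines = sql_content.split('\n')
--     output = []
--     skipping = False
--     for line in lines:
--         trimmed = line.strip()
--         # Skip INSERT INTO and DELETE FROM blocks
--         if trimmed.upper().startswith('INSERT INTO') or trimmed.upper().startswith('DELETE FROM'):
--             if not trimmed.endswith(';'):
--                 skipping = True
--             continue
--         if skipping:
--             if trimmed.endswith(';'):
--                 skipping = False
--             continue
--         # Also skip phpMyAdmin metadata comments related to dumping data if present
--         if trimmed.startswith('-- Dumping data for table'):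
--             continue
--         output.append(line)
--     return '\n'.join(output)
-- ===== SOURCE B (Python) =====
-- def strip_original_data(sql_content):
--     lines = sql_content.split('\n')
--     output = []
--     i = 0
--     n = len(lines)
--     while i < n:
--         line = lines[i]
--         trimmed = line.strip()
--         upper = trimmed.upper()
--         if upper.startswith('INSERT INTO') or upper.startswith('DELETE FROM'):
--             if not trimmed.endswith(';'):
--                 # skip the block: advance past lines until a closing line
--                 # (ends with ';' and is not itself an INSERT/DELETE header,
--                 # which A keeps skipping over), then drop that closing line too
--                 i += 1
--                 while i < n:
--                     t = lines[i].strip()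
--                     u = t.upper()
--                     if t.endswith(';') and not (u.startswith('INSERT INTO') or u.startswith('DELETE FROM')):
--                         break
--                     i += 1
--             i += 1
--             continue
--         if trimmed.startswith('-- Dumping data for table'):
--             i += 1
--             continue
--         output.append(line)
--         i += 1
--     return '\n'.join(output)
-- ===== Notes on version B (the rewrite author's own statement) =====
-- stated objective: alternative
-- what changed: Replaced A's flag-carried single pass (a 'skipping' boolean threaded through every line) by an index-driven outer loop with a dedicated inner loop that consumes a whole INSERT/DELETE block at once, so no skip state crosses iterations.
import Mathlib
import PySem

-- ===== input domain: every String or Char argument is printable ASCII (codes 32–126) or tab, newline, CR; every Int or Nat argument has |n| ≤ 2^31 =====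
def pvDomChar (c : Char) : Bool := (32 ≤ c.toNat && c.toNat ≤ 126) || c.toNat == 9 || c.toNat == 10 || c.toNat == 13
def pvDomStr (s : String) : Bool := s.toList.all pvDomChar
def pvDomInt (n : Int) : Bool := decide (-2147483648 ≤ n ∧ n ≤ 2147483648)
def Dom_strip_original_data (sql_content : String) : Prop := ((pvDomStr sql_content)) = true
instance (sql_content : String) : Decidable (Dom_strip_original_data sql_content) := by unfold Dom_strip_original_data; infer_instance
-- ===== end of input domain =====

-- B replaces A's flag-carried single pass by an outer index loop with an inner
-- loop that consumes each INSERT/DELETE block in one go (objective: alternative).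

-- shared condition helpers (the same tests both Pythons perform)
def pvIsStmt (t : String) : Bool :=
  PySem.Str.startswith (PySem.Str.upper t) "INSERT INTO" ||
  PySem.Str.startswith (PySem.Str.upper t) "DELETE FROM"

def pvEndsSemi (t : String) : Bool := PySem.Str.endswith t ";"

-- ===== PORT A =====
def pvStepA (st : List String × Bool) (line : String) : List String × Bool :=
  let trimmed := PySem.Str.strip line
  if pvIsStmt trimmed then
    if !pvEndsSemi trimmed then (st.1, true) else st
  else if st.2 then
    if pvEndsSemi trimmed then (st.1, false) else st
  else if PySem.Str.startswith trimmed "-- Dumping data for table" then st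
  else (st.1 ++ [line], st.2)

def strip_original_data (sql_content : String) : String :=
  let lines := (PySem.Str.split? sql_content "\n").getD []
  PySem.Str.join "\n" (lines.foldl pvStepA ([], false)).1

-- ===== PORT B =====
-- inner while-loop: advance past block lines until a closing line (ends with ';'
-- and is not itself an INSERT/DELETE header), drop that closing line too
def pvDropBlock : List String → List String
  | [] => []
  | l :: rest =>
      let t := PySem.Str.strip l
      if pvEndsSemi t && !pvIsStmt t then rest else pvDropBlock rest

theorem pvDropBlock_length_le (xs : List String) : (pvDropBlock xs).length ≤ xs.length := by
  induction xs with
  | nil => simp [pvDropBlock]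
  | cons l rest ih =>
      simp only [pvDropBlock]
      split <;> simp only [List.length_cons] <;> omega

-- outer loop over the line index
def pvGoB : List String → List String
  | [] => []
  | l :: rest =>
      let t := PySem.Str.strip l
      if pvIsStmt t then
        if pvEndsSemi t then pvGoB rest
        else pvGoB (pvDropBlock rest)
      else if PySem.Str.startswith t "-- Dumping data for table" then pvGoB rest
      else l :: pvGoB rest
termination_by xs => xs.length
decreasing_by
  · simp
  · have := pvDropBlock_length_le rest; simp; omega
  · simp
  · simp

def strip_original_data_alt (sql_content : String) : String :=
  PySem.Str.join "\n" (pvGoB ((PySem.Str.split? sql_content "\n").getD []))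

-- ===== PRECONDITION & SPEC =====
def Spec_strip_original_data (sql_content : String) (out : String) : Prop := out = strip_original_data_alt sql_content
instance (sql_content : String) (out : String) : Decidable (Spec_strip_original_data sql_content out) := by unfold Spec_strip_original_data; infer_instance

-- ===== CLAIM (what is proved, stated in full; the proofs are below) =====
def Claim_equal_strip_original_data : Prop := ∀ (sql_content : String), Dom_strip_original_data sql_content → Spec_strip_original_data sql_content (strip_original_data sql_content)

-- ===== LEMMAS AND PROOFS =====

-- loop invariant: A's fold from skipping=false computes pvGoB, and from
-- skipping=true it computes pvGoB after dropping the rest of the block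
theorem pvFold_eq (lines : List String) :
    (∀ out : List String, (List.foldl pvStepA (out, false) lines).1 = out ++ pvGoB lines) ∧
    (∀ out : List String, (List.foldl pvStepA (out, true) lines).1 = out ++ pvGoB (pvDropBlock lines)) := by
  induction lines with
  | nil => simp [pvGoB, pvDropBlock]
  | cons l rest ih =>
      obtain ⟨ih1, ih2⟩ := ih
      constructor
      · intro out
        simp only [List.foldl_cons, pvStepA, pvGoB]
        split_ifs with h1 h2 h3 <;>
          simp_all [List.append_assoc]
      · intro out
        simp only [List.foldl_cons, pvStepA, pvDropBlock]
        by_cases h1 : pvIsStmt (PySem.Str.strip l)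
        · by_cases h2 : pvEndsSemi (PySem.Str.strip l) <;>
            simp [h1, h2, ih2]
        · by_cases h2 : pvEndsSemi (PySem.Str.strip l)
          · simp [h1, h2, ih1]
          · simp [h1, h2, ih2]

-- ===== VERDICT (by name: the statement is the Claim_ definition above) =====
theorem strip_original_data_spec : Claim_equal_strip_original_data := by
  intro s _
  show _ = _
  simp only [strip_original_data, strip_original_data_alt]
  rw [(pvFold_eq ((PySem.Str.split? s "\n").getD [])).1 []]
  rfl
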